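-- pv_equiv track=rewrite | github.com/Eduardo-Ingles/AI_Helper | backend/scripts/Operazioni_DB/PosizionaDevice_OLD/sharedCode.py | defineChunkSize
-- ===== SOURCE A (Python) =====
-- def defineChunkSize(CpuCores, dataSetSize):
--     chunk_size = int(dataSetSize / CpuCores)
--     remainder = dataSetSize % CpuCores
--     chunks = []
--     start_index = 0
--     for i in range(CpuCores):
--         end_index = start_index + chunk_size
--         if i < remainder:   # Distribute the remainder across the first few chunks
--             end_index += 1
--         chunks.append((start_index, end_index))
--         start_index = end_index
--     return chunks
-- ===== SOURCE B (Python) =====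
-- def defineChunkSize(CpuCores, dataSetSize):
--     chunk_size = int(dataSetSize / CpuCores)
--     remainder = dataSetSize % CpuCores
--     return [(i * chunk_size + min(i, remainder),
--              (i + 1) * chunk_size + min(i + 1, remainder))
--             for i in range(CpuCores)]
-- ===== Notes on version B (the rewrite author's own statement) =====
-- stated objective: simpler
-- what changed: Replaced the loop that threads a running start_index accumulator with a direct closed-form comprehension: each chunk boundary is computed independently as i*chunk_size + min(i, remainder).
import Mathlib
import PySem

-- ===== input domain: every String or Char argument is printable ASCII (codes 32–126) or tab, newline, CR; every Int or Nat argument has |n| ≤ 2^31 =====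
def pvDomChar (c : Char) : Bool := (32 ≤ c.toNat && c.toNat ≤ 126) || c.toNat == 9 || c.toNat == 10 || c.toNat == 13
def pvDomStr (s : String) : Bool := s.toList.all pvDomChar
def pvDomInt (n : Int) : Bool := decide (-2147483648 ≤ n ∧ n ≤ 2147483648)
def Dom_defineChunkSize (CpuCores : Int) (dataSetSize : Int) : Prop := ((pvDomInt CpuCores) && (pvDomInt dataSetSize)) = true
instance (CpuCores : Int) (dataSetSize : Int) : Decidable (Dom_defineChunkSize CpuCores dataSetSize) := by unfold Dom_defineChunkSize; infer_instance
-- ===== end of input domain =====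

-- B removes A's running start_index accumulator and emits each chunk's bounds by a closed
-- formula per index (objective: simpler).
-- 'int(dataSetSize / CpuCores)' is truncating division; on Dom (|n| ≤ 2^31) the float quotient
-- truncates to exactly Int.tdiv, which is how both ports render it.

-- ===== PORT A =====
def defineChunkSize (CpuCores : Int) (dataSetSize : Int) : List (Int × Int) :=
  let chunk_size := dataSetSize.tdiv CpuCores
  let remainder := PySem.Int.mod dataSetSize CpuCores
  ((PySem.List.pyRange 0 CpuCores 1).foldl
    (fun (s : List (Int × Int) × Int) i =>
      let end_index := s.2 + chunk_size
      let end_index := if i < remainder then end_index + 1 else end_index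
      (s.1 ++ [(s.2, end_index)], end_index))
    ([], 0)).1

-- ===== PORT B =====
def defineChunkSize_alt (CpuCores : Int) (dataSetSize : Int) : List (Int × Int) :=
  let chunk_size := dataSetSize.tdiv CpuCores
  let remainder := PySem.Int.mod dataSetSize CpuCores
  (PySem.List.pyRange 0 CpuCores 1).map
    (fun i => (i * chunk_size + min i remainder,
               (i + 1) * chunk_size + min (i + 1) remainder))

-- ===== PRECONDITION & SPEC =====
-- Python raises ZeroDivisionError exactly when CpuCores = 0.
def Pre_defineChunkSize (CpuCores : Int) (dataSetSize : Int) : Prop := CpuCores ≠ 0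
instance (CpuCores : Int) (dataSetSize : Int) : Decidable (Pre_defineChunkSize CpuCores dataSetSize) := by unfold Pre_defineChunkSize; infer_instance
def pvWitness_defineChunkSize : Int × Int := (3, 10)
def Spec_defineChunkSize (CpuCores : Int) (dataSetSize : Int) (out : List (Int × Int)) : Prop := out = defineChunkSize_alt CpuCores dataSetSize
instance (CpuCores : Int) (dataSetSize : Int) (out : List (Int × Int)) : Decidable (Spec_defineChunkSize CpuCores dataSetSize out) := by unfold Spec_defineChunkSize; infer_instance

-- ===== CLAIM (what is proved, stated in full; the proofs are below) =====
def Claim_equal_defineChunkSize : Prop := ∀ (CpuCores : Int) (dataSetSize : Int), Dom_defineChunkSize CpuCores dataSetSize → Pre_defineChunkSize CpuCores dataSetSize → Spec_defineChunkSize CpuCores dataSetSize (defineChunkSize CpuCores dataSetSize)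

-- ===== LEMMAS AND PROOFS =====

-- A's loop over range(n), folded from ([], 0), produces exactly B's per-index closed forms,
-- with final start_index n*cs + min n r (needs 0 ≤ r, which holds since Python's % with a
-- positive divisor is nonnegative).
lemma chunk_loop (cs r : Int) (hr : 0 ≤ r) (n : Nat) :
    (PySem.List.pyRange 0 (n : Int) 1).foldl
      (fun (s : List (Int × Int) × Int) i =>
        (s.1 ++ [(s.2, if i < r then s.2 + cs + 1 else s.2 + cs)],
         if i < r then s.2 + cs + 1 else s.2 + cs))
      ([], 0)
    = ((PySem.List.pyRange 0 (n : Int) 1).map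
        (fun i => (i * cs + min i r, (i + 1) * cs + min (i + 1) r)),
       (n : Int) * cs + min (n : Int) r) := by
  induction n with
  | zero => simp [PySem.List.pyRange_one_eq_nil, hr]
  | succ k ih =>
      have h1 : ((k + 1 : Nat) : Int) = (k : Int) + 1 := by push_cast; ring
      rw [h1, PySem.List.pyRange_one_succ_right (by positivity), List.foldl_append,
        List.map_append, ih]
      simp only [List.foldl_cons, List.foldl_nil, List.map_cons, List.map_nil]
      have hmin : min ((k : Int) + 1) r = if (k : Int) < r then min (k : Int) r + 1 else min (k : Int) r := by
        split_ifs with h <;> omega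
      rw [Prod.ext_iff]
      constructor
      · simp only [hmin, List.append_right_inj, List.cons.injEq, Prod.mk.injEq, and_true]
        split_ifs with h <;> exact ⟨trivial, by ring⟩
      · simp only [hmin]
        split_ifs with h <;> ring

-- ===== VERDICT (by name: the statement is the Claim_ definition above) =====

theorem defineChunkSize_spec : Claim_equal_defineChunkSize := by
  intro c d _ hpre
  unfold Spec_defineChunkSize defineChunkSize defineChunkSize_alt
  rcases lt_trichotomy c 0 with hc | hc | hc
  · rw [PySem.List.pyRange_one_eq_nil (by omega)]
    simp
  · exact absurd hc hpre
  · have hr : 0 ≤ PySem.Int.mod d c := by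
      rw [PySem.Int.mod_eq_emod_of_pos hc]
      exact Int.emod_nonneg d (by omega)
    obtain ⟨n, rfl⟩ : ∃ n : Nat, c = (n : Int) := ⟨c.toNat, by omega⟩
    dsimp only
    rw [chunk_loop _ _ hr n]
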